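-- pv_equiv track=rewrite | github.com/lucifer2701/Leetcode | Bike Racing - GFG/bike-racing.py | buzzTime
-- ===== SOURCE A (Python) =====
-- def buzzTime(N, M, L, H, A):
-- 	# code here
-- 	def speed(H, A, T):
-- 	    return H+A*T
-- 	def finalSpeed(T):
-- 	    tot = 0
-- 	    for i in range(N):
-- 	        s = speed(H[i],A[i],T)
-- 	        if s >= L:
-- 	            tot += s
-- 	    return tot>=M
-- 	low = 0
-- 	high = 10**9
-- 	while low < high:
-- 	    mid = (low+high) //2
-- 	    if finalSpeed(mid):
-- 	        high = mid
-- 	    else: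
-- 	        low = mid + 1
-- 	return high
-- ===== SOURCE B (Python) =====
-- def buzzTime(N, M, L, H, A):
--     bikes = list(zip(H, A))[:max(N, 0)]
--     def reaches(T):
--         return sum(h + a * T for h, a in bikes if h + a * T >= L) >= M
--     def search(lo, hi):
--         if lo >= hi:
--             return hi
--         mid = (lo + hi) // 2
--         return search(lo, mid) if reaches(mid) else search(mid + 1, hi)
--     return search(0, 10**9)
-- ===== Notes on version B (the rewrite author's own statement) =====
-- stated objective: idiomatic
-- what changed: Replaces the imperative while-loop bisection whose probe indexes H and A over range(N) with an accumulator by a recursive bisection over a (h,a) pair list built once by zip/truncation, with the probe as a filtered generator sum; the probe trajectory is kept exactly, as it must be: the predicate need not be monotone for arbitrary inputs, so any other probe sequence could change the result.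
import Mathlib
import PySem

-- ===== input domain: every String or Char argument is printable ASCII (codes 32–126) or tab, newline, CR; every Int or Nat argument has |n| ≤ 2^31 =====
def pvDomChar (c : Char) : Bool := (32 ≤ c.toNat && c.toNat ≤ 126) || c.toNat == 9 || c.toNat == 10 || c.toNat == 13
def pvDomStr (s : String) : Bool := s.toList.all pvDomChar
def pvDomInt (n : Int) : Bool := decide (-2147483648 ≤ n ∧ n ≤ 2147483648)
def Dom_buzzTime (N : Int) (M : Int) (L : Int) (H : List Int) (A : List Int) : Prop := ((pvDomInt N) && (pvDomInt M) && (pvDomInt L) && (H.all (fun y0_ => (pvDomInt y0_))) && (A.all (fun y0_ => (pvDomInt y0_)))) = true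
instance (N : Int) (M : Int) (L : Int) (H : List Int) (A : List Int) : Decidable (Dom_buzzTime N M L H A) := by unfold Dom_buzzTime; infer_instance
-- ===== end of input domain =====

-- B restructures A's imperative while-loop bisection (whose probe indexes H and A over range(N))
-- into a recursive bisection over a prebuilt truncated (h,a) pair list with a filtered-sum probe;
-- the probe trajectory is preserved exactly, so the return value is identical on Pre_.

-- ===== PORT A =====
-- helper `speed(H, A, T)`
def pvSpeedA (h a t : Int) : Int := h + a * t

-- helper `finalSpeed(T)`: loop `for i in range(N)` summing qualifying speeds.
-- H[i]/A[i] via pyGetD: Pre_buzzTime guarantees the index is in range (else Python raises IndexError).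
def pvFinalSpeedA (N M L : Int) (H A : List Int) (T : Int) : Bool :=
  let tot := (PySem.List.pyRange 0 N 1).foldl
    (fun tot i =>
      let s := pvSpeedA (PySem.List.pyGetD H i 0) (PySem.List.pyGetD A i 0) T
      if s ≥ L then tot + s else tot) 0
  decide (tot ≥ M)

-- the `while low < high` loop; fuel = high - low bounds the iteration count
-- (the interval shrinks by at least 1 each iteration), so the port is exact.
def pvLoopA (N M L : Int) (H A : List Int) : Nat → Int → Int → Int
  | 0, _, high => high
  | fuel + 1, low, high =>
    if low < high then
      let mid := PySem.Int.floordiv (low + high) 2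
      if pvFinalSpeedA N M L H A mid then pvLoopA N M L H A fuel low mid
      else pvLoopA N M L H A fuel (mid + 1) high
    else high

def buzzTime (N : Int) (M : Int) (L : Int) (H : List Int) (A : List Int) : Int :=
  pvLoopA N M L H A 1000000000 0 1000000000

-- ===== PORT B =====
-- `reaches(T)`: sum(h + a*T for h, a in bikes if h + a*T >= L) >= M
def pvReachesB (M L : Int) (bikes : List (Int × Int)) (T : Int) : Bool :=
  decide ((((bikes.filter (fun p => decide (p.1 + p.2 * T ≥ L))).map
      (fun p => p.1 + p.2 * T)).sum) ≥ M)

-- `search(lo, hi)`: recursive bisection; fuel = hi - lo bounds the recursion depth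
-- (the interval shrinks by at least 1 per call), so the port is exact.
def pvSearchB (M L : Int) (bikes : List (Int × Int)) : Nat → Int → Int → Int
  | 0, _, hi => hi
  | fuel + 1, lo, hi =>
    if lo ≥ hi then hi
    else
      let mid := PySem.Int.floordiv (lo + hi) 2
      if pvReachesB M L bikes mid then pvSearchB M L bikes fuel lo mid
      else pvSearchB M L bikes fuel (mid + 1) hi

def buzzTime_alt (N : Int) (M : Int) (L : Int) (H : List Int) (A : List Int) : Int :=
  let bikes := PySem.List.slice (H.zip A) none (some (max N 0))
  pvSearchB M L bikes 1000000000 0 1000000000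

-- ===== PRECONDITION & SPEC =====
-- Pre_ excludes exactly the inputs where A raises IndexError: the loop `for i in range(N)`
-- reads H[i] and A[i], so A raises iff N > len(H) or N > len(A).
def Pre_buzzTime (N : Int) (M : Int) (L : Int) (H : List Int) (A : List Int) : Prop :=
  N ≤ (H.length : Int) ∧ N ≤ (A.length : Int)
instance (N : Int) (M : Int) (L : Int) (H : List Int) (A : List Int) : Decidable (Pre_buzzTime N M L H A) := by unfold Pre_buzzTime; infer_instance

def pvWitness_buzzTime : Int × Int × Int × List Int × List Int := (1, 5, 2, [1], [2])

def Spec_buzzTime (N : Int) (M : Int) (L : Int) (H : List Int) (A : List Int) (out : Int) : Prop := out = buzzTime_alt N M L H A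
instance (N : Int) (M : Int) (L : Int) (H : List Int) (A : List Int) (out : Int) : Decidable (Spec_buzzTime N M L H A out) := by unfold Spec_buzzTime; infer_instance

-- ===== CLAIM (what is proved, stated in full; the proofs are below) =====
def Claim_equal_buzzTime : Prop := ∀ (N : Int) (M : Int) (L : Int) (H : List Int) (A : List Int), Dom_buzzTime N M L H A → Pre_buzzTime N M L H A → Spec_buzzTime N M L H A (buzzTime N M L H A)


-- ===== LEMMAS AND PROOFS =====

-- A's qualifying-speed sum over range(n) equals B's filtered sum over the first n (h,a) pairs.
lemma pv_tot_eq (n : Nat) (H A : List Int) (hH : n ≤ H.length) (hA : n ≤ A.length) (L T : Int) :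
    (PySem.List.pyRange 0 (n : Int) 1).foldl
      (fun tot i =>
        let s := pvSpeedA (PySem.List.pyGetD H i 0) (PySem.List.pyGetD A i 0) T
        if s ≥ L then tot + s else tot) 0
    = ((((H.zip A).take n).filter (fun p => decide (p.1 + p.2 * T ≥ L))).map
        (fun p => p.1 + p.2 * T)).sum := by
  induction n with
  | zero => simp [PySem.List.pyRange_one_eq_nil]
  | succ n ih =>
    have hH' : n ≤ H.length := by omega
    have hA' : n ≤ A.length := by omega
    have hz : n < (H.zip A).length := by simp [List.length_zip]; omega
    have hcast : ((n + 1 : Nat) : Int) = (n : Int) + 1 := by push_cast; ring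
    rw [hcast, PySem.List.pyRange_one_succ_right (by positivity),
        List.foldl_append, ih hH' hA',
        List.take_add_one, List.getElem?_eq_getElem hz,
        List.filter_append, List.map_append, List.sum_append]
    have hg : (H.zip A)[n] = (H[n]'(by omega), A[n]'(by omega)) := List.getElem_zip ..
    simp only [List.foldl_cons, List.foldl_nil, pvSpeedA,
      PySem.List.pyGetD_natCast, List.getD_eq_getElem?_getD,
      List.getElem?_eq_getElem (show n < H.length by omega),
      List.getElem?_eq_getElem (show n < A.length by omega),
      Option.getD_some, hg, Option.toList_some, List.filter_cons]
    split_ifs <;> simp_all <;> omega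

-- with pointwise-equal probes, the two bisections coincide for every fuel and interval.
lemma pv_loop_eq (N M L : Int) (H A : List Int) (bikes : List (Int × Int))
    (hpred : ∀ T, pvFinalSpeedA N M L H A T = pvReachesB M L bikes T) :
    ∀ (fuel : Nat) (lo hi : Int),
      pvLoopA N M L H A fuel lo hi = pvSearchB M L bikes fuel lo hi := by
  intro fuel
  induction fuel with
  | zero => intro lo hi; rfl
  | succ f ih =>
    intro lo hi
    simp only [pvLoopA, pvSearchB, hpred]
    by_cases hlt : lo < hi
    · rw [if_pos hlt, if_neg (by omega : ¬ lo ≥ hi)]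
      split <;> exact ih ..
    · rw [if_neg hlt, if_pos (by omega : lo ≥ hi)]

-- ===== VERDICT (by name: the statement is the Claim_ definition above) =====
theorem buzzTime_spec : Claim_equal_buzzTime := by
  intro N M L H A _ hpre
  obtain ⟨h1, h2⟩ := hpre
  show buzzTime N M L H A = buzzTime_alt N M L H A
  unfold buzzTime buzzTime_alt
  apply pv_loop_eq
  intro T
  unfold pvFinalSpeedA pvReachesB
  rw [PySem.List.slice_to (H.zip A) (by omega : (0:Int) ≤ max N 0)]
  by_cases hN : 0 ≤ N
  · obtain ⟨n, rfl⟩ : ∃ n : Nat, N = (n : Int) := ⟨N.toNat, by omega⟩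
    rw [(by omega : (max (n : Int) 0).toNat = n), pv_tot_eq n H A (by omega) (by omega)]
  · rw [(by omega : (max N 0).toNat = 0), PySem.List.pyRange_one_eq_nil (by omega)]
    simp
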